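-- pv_equiv track=rewrite | github.com/Prismate/Tic-Tac-Toe | coordinates.py | user_input_to_coordinates
-- ===== SOURCE A (Python) =====
-- def user_input_to_coordinates(user_input):
--     user_input = user_input.lower()
--     list_woords = ['a', 'b', 'c']
--     list_rows = [0, 1, 2]
--     user_row = None
--
--     zip_object = zip(list_woords, list_rows)
--     for item in zip_object:
--         if item[0] == user_input[0]:
--             user_row = item[1]
--     return (user_row, int(user_input[1])-1)
-- ===== SOURCE B (Python) =====
-- def user_input_to_coordinates(user_input):
--     # Closed-form: row from ord arithmetic instead of scanning a zipped list.
--     s = user_input.lower()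
--     if s and 97 <= ord(s[0]) <= 99:  # between ord of lowercase A-row letter and C-row letter
--         user_row = ord(s[0]) - 97
--     else:
--         user_row = None
--     return (user_row, int(s[1]) - 1)
-- ===== Notes on version B (the rewrite author's own statement) =====
-- stated objective: simpler
-- what changed: The zip/loop scan over ['a','b','c'] is replaced by a constant-time closed-form ord(c)-ord('a') mapping guarded by 'a'<=c<='c'; the column computation is unchanged.
import Mathlib
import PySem

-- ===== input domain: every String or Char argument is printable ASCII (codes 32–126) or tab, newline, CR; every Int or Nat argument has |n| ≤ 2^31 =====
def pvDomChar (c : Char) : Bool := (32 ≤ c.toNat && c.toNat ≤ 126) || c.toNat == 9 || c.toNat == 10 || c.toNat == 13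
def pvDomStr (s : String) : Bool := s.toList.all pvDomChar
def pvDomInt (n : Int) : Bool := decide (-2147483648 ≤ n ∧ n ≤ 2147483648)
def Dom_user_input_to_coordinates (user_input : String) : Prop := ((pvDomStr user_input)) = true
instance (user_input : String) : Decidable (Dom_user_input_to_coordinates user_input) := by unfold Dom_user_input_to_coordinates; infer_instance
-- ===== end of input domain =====

-- B replaces A's zip/loop scan over ['a','b','c'] with a constant-time ord-arithmetic closed form (objective: simpler).

-- ===== PORT A =====
-- A: lower the input, scan zip(['a','b','c'],[0,1,2]) updating user_row on a match
-- with user_input[0], return (user_row, int(user_input[1]) - 1).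
def user_input_to_coordinates (user_input : String) : Option Int × Int :=
  ((List.zip ['a', 'b', 'c'] [(0 : Int), 1, 2]).foldl
      (fun acc item =>
        if some item.1 = PySem.List.pyGet? (PySem.Chars.lower user_input.toList) 0 then some item.2
        else acc)
      none,
   (PySem.Int.ofChars? [PySem.List.pyGetD (PySem.Chars.lower user_input.toList) 1 ' ']).getD 0 - 1)

-- ===== PORT B =====
-- B: row = ord(c) - 97 when 97 ≤ ord(c) ≤ 99 for the first lowered char, else None; same column.
def user_input_to_coordinates_alt (user_input : String) : Option Int × Int :=
  ((match PySem.List.pyGet? (PySem.Chars.lower user_input.toList) 0 with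
    | some c => if 97 ≤ c.toNat ∧ c.toNat ≤ 99 then some ((c.toNat : Int) - 97) else none
    | none => none),
   (PySem.Int.ofChars? [PySem.List.pyGetD (PySem.Chars.lower user_input.toList) 1 ' ']).getD 0 - 1)

-- ===== PRECONDITION & SPEC =====
-- Pre_ excludes exactly the inputs where A raises: strings shorter than 2 (IndexError on
-- user_input[1], or on user_input[0] when empty) and strings whose second character is not an
-- ASCII digit (ValueError from int(user_input[1])).  B raises the same exceptions there.
def Pre_user_input_to_coordinates (user_input : String) : Prop :=
  2 ≤ user_input.toList.length ∧ (user_input.toList.getD 1 ' ').isDigit = true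
instance (user_input : String) : Decidable (Pre_user_input_to_coordinates user_input) := by unfold Pre_user_input_to_coordinates; infer_instance
def pvWitness_user_input_to_coordinates : String := "b3"
def Spec_user_input_to_coordinates (user_input : String) (out : Option Int × Int) : Prop := out = user_input_to_coordinates_alt user_input
instance (user_input : String) (out : Option Int × Int) : Decidable (Spec_user_input_to_coordinates user_input out) := by unfold Spec_user_input_to_coordinates; infer_instance

-- ===== CLAIM (what is proved, stated in full; the proofs are below) =====
def Claim_equal_user_input_to_coordinates : Prop := ∀ (user_input : String), Dom_user_input_to_coordinates user_input → Pre_user_input_to_coordinates user_input → Spec_user_input_to_coordinates user_input (user_input_to_coordinates user_input)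

-- ===== LEMMAS AND PROOFS =====

-- The unrolled 3-step fold of A equals B's ord-arithmetic closed form, for any first char.
theorem row_closed_form (c : Char) :
    (if some 'c' = some c then some ((2 : Int))
     else if some 'b' = some c then some 1
     else if some 'a' = some c then some 0 else none)
      = (if 97 ≤ c.toNat ∧ c.toNat ≤ 99 then some ((c.toNat : Int) - 97) else none) := by
  by_cases h1 : c = 'a' <;> by_cases h2 : c = 'b' <;> by_cases h3 : c = 'c' <;>
    simp_all [Char.ext_iff]
  · have hv : c.toNat = 97 := by rw [show c.toNat = c.val.toNat from rfl, h1]; decide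
    rw [hv]; norm_num
  · have hv : c.toNat = 98 := by rw [show c.toNat = c.val.toNat from rfl, h2]; decide
    rw [hv]; norm_num
  · have hv : c.toNat = 99 := by rw [show c.toNat = c.val.toNat from rfl, h3]; decide
    rw [hv]; norm_num
  · have hv1 : c.val.toNat ≠ 97 := fun h => h1 (UInt32.toNat_inj.mp (by simpa using h))
    have hv2 : c.val.toNat ≠ 98 := fun h => h2 (UInt32.toNat_inj.mp (by simpa using h))
    have hv3 : c.val.toNat ≠ 99 := fun h => h3 (UInt32.toNat_inj.mp (by simpa using h))
    rw [if_neg (fun h => h3 h.symm), if_neg (fun h => h2 h.symm), if_neg (fun h => h1 h.symm),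
        if_neg (by rw [show c.toNat = c.val.toNat from rfl]; omega)]

-- ===== VERDICT (by name: the statement is the Claim_ definition above) =====
theorem user_input_to_coordinates_spec : Claim_equal_user_input_to_coordinates := by
  intro user_input _ _
  unfold Spec_user_input_to_coordinates user_input_to_coordinates user_input_to_coordinates_alt
  refine Prod.ext ?_ rfl
  simp only [List.zip, List.zipWith, List.foldl]
  cases hg : PySem.List.pyGet? (PySem.Chars.lower user_input.toList) 0 with
  | none => simp
  | some c => simpa using row_closed_form c
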